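-- pv_equiv track=rewrite | github.com/tiumbj/Bot_Data_Basese | Local_LLM/gold_research/jobs/enrich_top3_m30_regimes.py | find_first_existing_column
-- ===== SOURCE A (Python) =====
-- from typing import Dict, List, Optional, Tuple
--
-- def find_first_existing_column(columns: List[str], candidates: List[str]) -> Optional[str]:
--     for candidate in candidates:
--         if candidate in columns:
--             return candidate
--     lower_map = {col.lower(): col for col in columns}
--     for candidate in candidates:
--         if candidate.lower() in lower_map:
--             return lower_map[candidate.lower()]
--     return None
-- ===== SOURCE B (Python) =====
-- def find_first_existing_column(columns, candidates):
--     lower_map = {col.lower(): col for col in columns}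
--     fallback = None
--     for candidate in candidates:
--         if candidate in columns:
--             return candidate
--         if fallback is None and candidate.lower() in lower_map:
--             fallback = lower_map[candidate.lower()]
--     return fallback
-- ===== Notes on version B (the rewrite author's own statement) =====
-- stated objective: alternative
-- what changed: A's two sequential scans over candidates are merged into one pass that returns exact matches immediately and carries the first case-insensitive match in a fallback accumulator.
import Mathlib
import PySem

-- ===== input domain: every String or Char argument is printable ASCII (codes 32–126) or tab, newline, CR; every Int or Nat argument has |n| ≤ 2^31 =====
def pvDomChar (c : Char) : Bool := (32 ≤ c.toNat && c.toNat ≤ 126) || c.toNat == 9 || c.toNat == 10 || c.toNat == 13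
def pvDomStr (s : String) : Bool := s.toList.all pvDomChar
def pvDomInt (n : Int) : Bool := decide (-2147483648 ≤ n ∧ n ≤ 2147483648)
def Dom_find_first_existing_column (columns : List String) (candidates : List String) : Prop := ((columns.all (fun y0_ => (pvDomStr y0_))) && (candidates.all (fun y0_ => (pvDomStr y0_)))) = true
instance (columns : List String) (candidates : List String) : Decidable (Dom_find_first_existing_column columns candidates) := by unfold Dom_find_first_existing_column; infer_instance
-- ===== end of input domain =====

-- B merges A's two sequential candidate scans into ONE pass carrying the first
-- case-insensitive match as a fallback accumulator (objective: alternative decomposition).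

-- ===== PORT A =====
-- first loop: return the first candidate that is exactly in columns
def ffecExactLoop (columns : List String) : List String → Option String
  | [] => none
  | c :: rest => if columns.contains c then some c else ffecExactLoop columns rest

-- lower_map = {col.lower(): col for col in columns}
def ffecLowerMap (columns : List String) : PySem.Dict String String :=
  columns.foldl (fun d col => d.insert (PySem.Str.lower col) col) PySem.Dict.empty

-- second loop: return lower_map[candidate.lower()] for the first candidate whose lower is a key
def ffecCiLoop (d : PySem.Dict String String) : List String → Option String
  | [] => none
  | c :: rest =>
    match d.get? (PySem.Str.lower c) with
    | some v => some v
    | none => ffecCiLoop d rest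

def find_first_existing_column (columns : List String) (candidates : List String) : Option String :=
  match ffecExactLoop columns candidates with
  | some c => some c
  | none => ffecCiLoop (ffecLowerMap columns) candidates

-- ===== PORT B =====
-- single pass with a fallback accumulator
def ffecOnePass (columns : List String) (d : PySem.Dict String String) :
    Option String → List String → Option String
  | fb, [] => fb
  | fb, c :: rest =>
    if columns.contains c then some c
    else
      ffecOnePass columns d
        (match fb with
         | some v => some v
         | none => d.get? (PySem.Str.lower c)) rest

def find_first_existing_column_alt (columns : List String) (candidates : List String) : Option String :=
  ffecOnePass columns (ffecLowerMap columns) none candidates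

-- ===== PRECONDITION & SPEC =====
def Spec_find_first_existing_column (columns : List String) (candidates : List String) (out : Option String) : Prop := out = find_first_existing_column_alt columns candidates
instance (columns : List String) (candidates : List String) (out : Option String) : Decidable (Spec_find_first_existing_column columns candidates out) := by unfold Spec_find_first_existing_column; infer_instance

-- ===== CLAIM (what is proved, stated in full; the proofs are below) =====
def Claim_equal_find_first_existing_column : Prop := ∀ (columns : List String) (candidates : List String), Dom_find_first_existing_column columns candidates → Spec_find_first_existing_column columns candidates (find_first_existing_column columns candidates)

-- ===== LEMMAS AND PROOFS =====

-- B's one-pass loop equals: any exact match wins, else the incoming fallback, else A's ci loop.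
theorem ffecOnePass_eq (columns : List String) (d : PySem.Dict String String) :
    ∀ (cands : List String) (fb : Option String),
      ffecOnePass columns d fb cands =
        match ffecExactLoop columns cands with
        | some v => some v
        | none =>
          match fb with
          | some v => some v
          | none => ffecCiLoop d cands := by
  intro cands
  induction cands with
  | nil => intro fb; cases fb <;> rfl
  | cons c rest ih =>
    intro fb
    by_cases h : c ∈ columns
    · simp [ffecOnePass, ffecExactLoop, h]
    · simp only [ffecOnePass, ffecExactLoop]
      rw [if_neg (by simpa using h), if_neg (by simpa using h), ih]
      cases fb with
      | some v => rfl
      | none =>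
        cases hd : d.get? (PySem.Str.lower c) with
        | some v =>
          cases ffecExactLoop columns rest <;> simp [ffecCiLoop, hd]
        | none =>
          cases ffecExactLoop columns rest <;> simp [ffecCiLoop, hd]

-- ===== VERDICT (by name: the statement is the Claim_ definition above) =====
theorem find_first_existing_column_spec : Claim_equal_find_first_existing_column := by
  intro columns candidates _
  unfold Spec_find_first_existing_column find_first_existing_column find_first_existing_column_alt
  rw [ffecOnePass_eq]
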